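-- pv_equiv track=rewrite | github.com/scarletYewon/1-1_py_algorithm | 과소사/회사출퇴근로그9.py | solution
-- ===== SOURCE A (Python) =====
-- def solution(logs):
--     d = set()
--     for i in logs:
--         if i in d:
--             d.remove(i)
--         else:
--             d.add(i)
--     answer = sorted(d)
--     return answer
-- ===== SOURCE B (Python) =====
-- def solution(logs):
--     counts = {}
--     for x in logs:
--         counts[x] = counts.get(x, 0) + 1
--     return sorted(k for k in counts if counts[k] % 2 == 1)
-- ===== Notes on version B (the rewrite author's own statement) =====
-- stated objective: alternative
-- what changed: Replaces the toggling set (add/remove per entry) with a full frequency count built in one pass, followed by a parity filter over the counted keys.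
import Mathlib
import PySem

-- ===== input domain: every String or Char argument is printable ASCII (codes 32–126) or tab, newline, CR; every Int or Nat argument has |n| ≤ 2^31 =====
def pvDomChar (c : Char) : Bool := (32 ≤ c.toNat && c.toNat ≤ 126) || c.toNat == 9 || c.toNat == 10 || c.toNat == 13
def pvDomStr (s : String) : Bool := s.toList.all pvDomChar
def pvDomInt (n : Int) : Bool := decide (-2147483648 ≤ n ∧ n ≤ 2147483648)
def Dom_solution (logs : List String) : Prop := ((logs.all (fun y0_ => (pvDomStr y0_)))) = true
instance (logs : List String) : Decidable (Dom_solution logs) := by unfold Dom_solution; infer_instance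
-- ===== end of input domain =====

-- B replaces A's toggling set with a one-pass frequency count followed by an odd-count filter
-- (objective: alternative decomposition; same result, same asymptotic cost).

-- ===== PORT A =====
-- d = set(); for i in logs: toggle i; return sorted(d)
def solution (logs : List String) : List String :=
  let d : PySem.Set String :=
    logs.foldl (fun d i =>
      if PySem.Set.contains d i then (PySem.Set.remove? d i).getD d
      else PySem.Set.add d i) PySem.Set.empty
  PySem.List.sorted d (fun x => x) false

-- ===== PORT B =====
-- counts = {}; for x in logs: counts[x] = counts.get(x,0)+1; return sorted(k for k in counts if counts[k] % 2 == 1)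
def solution_alt (logs : List String) : List String :=
  let counts : PySem.Dict String Int :=
    logs.foldl (fun d x => d.insert x (d.getD x 0 + 1)) PySem.Dict.empty
  PySem.List.sorted
    (counts.keys.filter (fun k => PySem.Int.mod (counts.getD k 0) 2 == 1))
    (fun x => x) false

-- ===== PRECONDITION & SPEC =====
def Spec_solution (logs : List String) (out : List String) : Prop := out = solution_alt logs
instance (logs : List String) (out : List String) : Decidable (Spec_solution logs out) := by unfold Spec_solution; infer_instance

-- ===== CLAIM (what is proved, stated in full; the proofs are below) =====
def Claim_equal_solution : Prop := ∀ (logs : List String), Dom_solution logs → Spec_solution logs (solution logs)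

-- ===== LEMMAS AND PROOFS =====

-- A's toggle loop: starting from a nodup set s, the result is nodup and x is a member
-- iff membership in s XOR (logs counts x an odd number of times).
theorem toggle_invariant (logs : List String) (s : PySem.Set String) (hs : s.Nodup) :
    (logs.foldl (fun d i =>
      if PySem.Set.contains d i then (PySem.Set.remove? d i).getD d
      else PySem.Set.add d i) s).Nodup ∧
    ∀ x, (x ∈ logs.foldl (fun d i =>
      if PySem.Set.contains d i then (PySem.Set.remove? d i).getD d
      else PySem.Set.add d i) s) ↔ ¬ ((x ∈ s) ↔ logs.count x % 2 = 1) := by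
  induction logs generalizing s with
  | nil => simp [hs]
  | cons a t ih =>
    simp only [List.foldl_cons]
    by_cases ha : a ∈ s
    · rw [if_pos (by simpa [PySem.Set.contains_iff] using ha),
        PySem.Set.remove?_of_mem ha]
      simp only [Option.getD_some]
      obtain ⟨h1, h2⟩ := ih (PySem.Set.discard s a) (PySem.Set.nodup_discard _ _ hs)
      refine ⟨h1, fun x => ?_⟩
      rw [h2 x, PySem.Set.mem_discard]
      by_cases hxa : x = a
      · subst hxa
        simp [List.count_cons_self, ha]
        omega
      · have hax : ¬ a = x := fun h => hxa h.symm
        simp [hax]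
        tauto
    · rw [if_neg (by simpa [PySem.Set.contains_iff] using ha)]
      have hadd : PySem.Set.add s a = s ++ [a] := by
        simp [PySem.Set.add, ha]
      rw [hadd]
      obtain ⟨h1, h2⟩ := ih (s ++ [a])
        (by
          simp [List.nodup_append, hs]
          exact fun y hy hya => ha (hya ▸ hy))
      refine ⟨h1, fun x => ?_⟩
      rw [h2 x]
      by_cases hxa : x = a
      · subst hxa
        simp [List.count_cons_self, ha]
        omega
      · have hax : ¬ a = x := fun h => hxa h.symm
        simp [hax]
        tauto

-- B's selected key list: nodup, and membership is exactly "odd count in logs".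
theorem alt_keys_spec (logs : List String) :
    ((logs.foldl (fun (d : PySem.Dict String Int) x => d.insert x (d.getD x 0 + 1)) PySem.Dict.empty).keys.filter
        (fun k => PySem.Int.mod
          ((logs.foldl (fun (d : PySem.Dict String Int) x => d.insert x (d.getD x 0 + 1)) PySem.Dict.empty).getD k 0) 2 == 1)).Nodup ∧
    ∀ x, (x ∈ (logs.foldl (fun (d : PySem.Dict String Int) x => d.insert x (d.getD x 0 + 1)) PySem.Dict.empty).keys.filter
        (fun k => PySem.Int.mod
          ((logs.foldl (fun (d : PySem.Dict String Int) x => d.insert x (d.getD x 0 + 1)) PySem.Dict.empty).getD k 0) 2 == 1)) ↔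
      x ∈ logs ∧ logs.count x % 2 = 1 := by
  have hkeys : (logs.foldl (fun (d : PySem.Dict String Int) x => d.insert x (d.getD x 0 + 1)) PySem.Dict.empty).keys
      = PySem.Set.ofList logs := by
    rw [PySem.Dict.keys_foldl_insert]
    simp [PySem.Set.update, PySem.Set.ofList_eq_foldl, PySem.Dict.empty, PySem.Dict.keys]
  constructor
  · exact List.Nodup.filter _ (hkeys ▸ PySem.Set.nodup_ofList logs)
  · intro x
    rw [List.mem_filter, hkeys, PySem.Set.mem_ofList,
      PySem.Dict.getD_foldl_insert_add_one]
    simp only [PySem.Dict.getD_empty, zero_add]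
    rw [PySem.Int.mod_eq_emod_of_pos (by norm_num : (0:Int) < 2)]
    simp only [beq_iff_eq]
    constructor
    · rintro ⟨hm, hp⟩
      exact ⟨hm, by omega⟩
    · rintro ⟨hm, hp⟩
      exact ⟨hm, by omega⟩

-- ===== VERDICT (by name: the statement is the Claim_ definition above) =====
theorem solution_spec : Claim_equal_solution := by
  intro logs _
  unfold Spec_solution solution solution_alt
  obtain ⟨hA1, hA2⟩ := toggle_invariant logs PySem.Set.empty (by simp [PySem.Set.empty])
  obtain ⟨hB1, hB2⟩ := alt_keys_spec logs
  apply PySem.List.sorted_eq_sorted_of_perm _ _ _ (fun a b h => h)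
  rw [List.perm_ext_iff_of_nodup hA1 hB1]
  intro x
  rw [hA2 x, hB2 x]
  have hc : x ∈ logs ↔ logs.count x ≠ 0 := by
    simp [List.count_eq_zero]
  simp only [PySem.Set.empty, List.not_mem_nil, false_iff]
  constructor
  · intro h
    have := not_not.mp h
    exact ⟨by rw [hc]; omega, this⟩
  · rintro ⟨_, hp⟩
    exact not_not.mpr hp
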